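-- pv_equiv track=rewrite | github.com/ydb-platform/ydb | contrib/python/fastavro/fastavro/_schema_common.py | rabin_fingerprint
-- ===== SOURCE A (Python) =====
-- def rabin_fingerprint(data):
--     empty_64 = 0xC15D213AA4D7A795
--
--     fp_table = []
--     for i in range(256):
--         fp = i
--         for j in range(8):
--             mask = -(fp & 1)
--             fp = (fp >> 1) ^ (empty_64 & mask)
--         fp_table.append(fp)
--
--     result = empty_64
--     for byte in data:
--         result = (result >> 8) ^ fp_table[(result ^ byte) & 0xFF]
--
--     # Although not mentioned in the Avro specification, the Java
--     # implementation gives fingerprint bytes in little-endian order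
--     return result.to_bytes(length=8, byteorder="little", signed=False).hex()
-- ===== SOURCE B (Python) =====
-- def rabin_fingerprint(data):
--     # Table-free: fold each byte in and run the 8-step polynomial reduction directly.
--     empty_64 = 0xC15D213AA4D7A795
--     result = empty_64
--     for byte in data:
--         result ^= byte & 0xFF
--         for _ in range(8):
--             result = (result >> 1) ^ (empty_64 & -(result & 1))
--     return result.to_bytes(length=8, byteorder="little", signed=False).hex()
-- ===== Notes on version B (the rewrite author's own statement) =====
-- stated objective: simpler
-- what changed: Dropped the 256-entry fingerprint table entirely: each byte is XORed into the accumulator and reduced by the 8-step shift/conditional-XOR loop directly, which equals the table update by GF(2) linearity.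
import Mathlib
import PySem

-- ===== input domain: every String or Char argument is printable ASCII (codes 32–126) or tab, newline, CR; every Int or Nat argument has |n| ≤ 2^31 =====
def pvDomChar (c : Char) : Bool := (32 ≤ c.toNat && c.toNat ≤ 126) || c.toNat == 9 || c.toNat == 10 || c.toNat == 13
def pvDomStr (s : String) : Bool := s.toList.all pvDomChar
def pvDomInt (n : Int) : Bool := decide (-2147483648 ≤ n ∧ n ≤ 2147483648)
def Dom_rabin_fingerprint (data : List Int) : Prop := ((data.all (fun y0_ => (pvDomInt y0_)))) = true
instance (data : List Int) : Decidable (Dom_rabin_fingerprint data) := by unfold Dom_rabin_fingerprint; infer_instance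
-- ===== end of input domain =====

-- B drops A's 256-entry fingerprint table and reduces each byte with the 8-step
-- shift/conditional-XOR loop directly (equal by GF(2) linearity); objective: simpler.


-- shared tail: result.to_bytes(8, 'little').hex() — both Pythons end with this same line
def pvHexDigit (d : Nat) : Char := if d < 10 then Char.ofNat (48 + d) else Char.ofNat (87 + d)
def pvLeHex8 (n : Int) : String :=
  String.ofList ((List.range 8).flatMap (fun k =>
    let b := (n.toNat >>> (8 * k)) % 256
    [pvHexDigit (b / 16), pvHexDigit (b % 16)]))

-- ===== PORT A =====
def rabin_fingerprint (data : List Int) : String :=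
  let empty_64 : Int := 0xC15D213AA4D7A795
  let fp_table : List Int := (PySem.List.pyRange 0 256 1).foldl (fun tbl i =>
    let fp := (PySem.List.pyRange 0 8 1).foldl (fun fp _ =>
      let mask := -(PySem.Int.band fp 1)
      PySem.Int.bxor (fp >>> (1:Nat)) (PySem.Int.band empty_64 mask)) i
    tbl ++ [fp]) []
  let result := data.foldl (fun result byte =>
    PySem.Int.bxor (result >>> (8:Nat))
      ((PySem.List.pyGet? fp_table (PySem.Int.band (PySem.Int.bxor result byte) 255)).getD 0)) empty_64
  pvLeHex8 result

-- ===== PORT B =====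
def rabin_fingerprint_alt (data : List Int) : String :=
  let empty_64 : Int := 0xC15D213AA4D7A795
  let result := data.foldl (fun result byte =>
    (PySem.List.pyRange 0 8 1).foldl (fun r _ =>
      PySem.Int.bxor (r >>> (1:Nat)) (PySem.Int.band empty_64 (-(PySem.Int.band r 1))))
      (PySem.Int.bxor result (PySem.Int.band byte 255))) empty_64
  pvLeHex8 result

-- ===== PRECONDITION & SPEC =====
def Spec_rabin_fingerprint (data : List Int) (out : String) : Prop := out = rabin_fingerprint_alt data
instance (data : List Int) (out : String) : Decidable (Spec_rabin_fingerprint data out) := by unfold Spec_rabin_fingerprint; infer_instance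

-- ===== CLAIM (what is proved, stated in full; the proofs are below) =====
def Claim_equal_rabin_fingerprint : Prop := ∀ (data : List Int), Dom_rabin_fingerprint data → Spec_rabin_fingerprint data (rabin_fingerprint data)

-- ===== LEMMAS AND PROOFS =====

-- the one shift/conditional-XOR step, as both ports compute it on Int …
def pvStepI (fp : Int) : Int :=
  PySem.Int.bxor (fp >>> (1:Nat)) (PySem.Int.band 0xC15D213AA4D7A795 (-(PySem.Int.band fp 1)))

-- … and its Nat shadow
def pvStepN (x : Nat) : Nat := (x >>> 1) ^^^ (cond (x.testBit 0) 0xC15D213AA4D7A795 0)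

theorem pvStepI_cast (x : Nat) : pvStepI (x : Int) = ((pvStepN x : Nat) : Int) := by
  unfold pvStepI pvStepN
  have h1 : PySem.Int.band (x : Int) 1 = ((x &&& 1 : Nat) : Int) := by
    simpa using PySem.Int.band_natCast x 1
  rw [h1, Nat.and_one_is_mod]
  have hsr : ((x:Int) >>> (1:Nat)) = ((x >>> 1 : Nat) : Int) := rfl
  rcases Nat.mod_two_eq_zero_or_one x with h | h
  · have ht : x.testBit 0 = false := by rw [Nat.testBit_zero]; simp [h]
    rw [h, ht]
    norm_num
  · have ht : x.testBit 0 = true := by rw [Nat.testBit_zero]; simp [h]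
    rw [h, ht]
    norm_num
    rw [hsr]
    exact PySem.Int.bxor_natCast (x >>> 1) 0xC15D213AA4D7A795

theorem pvFoldl_const {α β : Type} (l : List α) (f : β → β) (x : β) :
    l.foldl (fun a _ => f a) x = f^[l.length] x := by
  induction l generalizing x with
  | nil => rfl
  | cons a l ih => simp [List.foldl_cons, ih, Function.iterate_succ_apply]

theorem pvStepI_iter_cast (k : Nat) (x : Nat) : pvStepI^[k] (x : Int) = ((pvStepN^[k] x : Nat) : Int) := by
  induction k generalizing x with
  | zero => rfl
  | succ k ih => rw [Function.iterate_succ_apply, Function.iterate_succ_apply, pvStepI_cast, ih]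

theorem pvXor_left_comm (a b c : Nat) : a ^^^ (b ^^^ c) = b ^^^ (a ^^^ c) := by
  rw [← Nat.xor_assoc, Nat.xor_comm a b, Nat.xor_assoc]

theorem pvStepN_xor (x y : Nat) : pvStepN (x ^^^ y) = pvStepN x ^^^ pvStepN y := by
  unfold pvStepN
  rw [Nat.shiftRight_xor_distrib, Nat.testBit_xor]
  cases hx : x.testBit 0 <;> cases hy : y.testBit 0 <;>
    simp [Nat.xor_assoc, pvXor_left_comm, Nat.xor_comm]

theorem pvStepN_iter_xor (k x y : Nat) : pvStepN^[k] (x ^^^ y) = pvStepN^[k] x ^^^ pvStepN^[k] y := by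
  induction k generalizing x y with
  | zero => rfl
  | succ k ih => simp only [Function.iterate_succ_apply, pvStepN_xor, ih]

theorem pvStepN_iter_shiftLeft (k q : Nat) : pvStepN^[k] (q <<< k) = q := by
  induction k generalizing q with
  | zero => simp
  | succ k ih =>
    rw [Function.iterate_succ_apply]
    have h1 : pvStepN (q <<< (k+1)) = q <<< k := by
      unfold pvStepN
      have he : q <<< (k+1) = 2 * (q <<< k) := Nat.shiftLeft_succ q k
      have ht : (q <<< (k+1)).testBit 0 = false := by
        rw [Nat.testBit_zero, he]; simp [Nat.mul_mod_right]
      rw [ht, he, Nat.shiftRight_one]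
      simp
    rw [h1, ih]

theorem pvDecomp (x : Nat) : x = ((x >>> 8) <<< 8) ^^^ (x &&& 255) := by
  apply Nat.eq_of_testBit_eq
  intro i
  rw [Nat.testBit_xor, Nat.testBit_shiftLeft, Nat.testBit_shiftRight,
    Nat.testBit_and, show (255:Nat) = 2^8-1 from rfl, Nat.testBit_two_pow_sub_one]
  by_cases h : i < 8
  · simp [h, Nat.not_le.mpr h]
  · have h8 : 8 + (i - 8) = i := by omega
    simp [h, h8, Nat.not_lt.mp h]

theorem pvKey8 (x : Nat) : pvStepN^[8] x = (x >>> 8) ^^^ pvStepN^[8] (x &&& 255) := by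
  conv_lhs => rw [pvDecomp x]
  rw [pvStepN_iter_xor, pvStepN_iter_shiftLeft]

theorem pvXor_small_shift {m : Nat} (n : Nat) (hm : m < 256) : (n ^^^ m) >>> 8 = n >>> 8 := by
  rw [Nat.shiftRight_xor_distrib]
  have : m >>> 8 = 0 := by rw [Nat.shiftRight_eq_div_pow]; omega
  simp [this]

theorem pvAnd255_lt (x : Nat) : x &&& 255 < 256 := by
  have := @Nat.and_le_right x 255; omega

set_option maxRecDepth 8192 in
theorem pvSub255 (y : Nat) (h : y < 256) : 255 - y = 255 ^^^ y := by
  revert h; revert y; decide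

theorem pvL7 (a c : Nat) : (a ^^^ c) &&& 255 = (a ^^^ (c &&& 255)) &&& 255 := by
  apply Nat.eq_of_testBit_eq
  intro i
  simp only [Nat.testBit_and, Nat.testBit_xor, show (255:Nat) = 2^8-1 from rfl,
    Nat.testBit_two_pow_sub_one]
  cases a.testBit i <;> cases c.testBit i <;> cases h : decide (i < 8) <;> simp

theorem pvL8 (n k : Nat) :
    (n ^^^ (255 ^^^ (255 &&& k))) &&& 255 = 255 ^^^ (255 &&& (n ^^^ k)) := by
  apply Nat.eq_of_testBit_eq
  intro i
  simp only [Nat.testBit_and, Nat.testBit_xor, show (255:Nat) = 2^8-1 from rfl,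
    Nat.testBit_two_pow_sub_one]
  cases n.testBit i <;> cases k.testBit i <;> cases h : decide (i < 8) <;> simp

-- index lemma: both ports see the same low byte, on every Int byte (also negative)
theorem pvByteIdx (n : Nat) (b : Int) :
    ∃ m : Nat, m < 256 ∧ PySem.Int.band b 255 = (m : Int) ∧
      PySem.Int.band (PySem.Int.bxor (n : Int) b) 255 = (((n ^^^ m) &&& 255 : Nat) : Int) := by
  by_cases hb : 0 ≤ b
  · obtain ⟨t, rfl⟩ := Int.eq_ofNat_of_zero_le hb
    refine ⟨t &&& 255, by have := @Nat.and_le_right t 255; omega, ?_, ?_⟩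
    · simpa using PySem.Int.band_natCast t 255
    · rw [PySem.Int.bxor_natCast]
      have := PySem.Int.band_natCast (n ^^^ t) 255
      simp only [Nat.cast_ofNat] at this ⊢
      rw [this]
      exact_mod_cast congrArg (Nat.cast : Nat → Int) (pvL7 n t)
  · replace hb : b < 0 := by omega
    have hknn : (0:Int) ≤ -b - 1 := by omega
    set k : Nat := (-b - 1).toNat with hk
    have hbk : -b - 1 = (k : Int) := (Int.toNat_of_nonneg hknn).symm
    refine ⟨255 - (255 &&& k), by omega, ?_, ?_⟩
    · simp only [PySem.Int.band, if_neg (by omega : ¬ (0:Int) ≤ b), if_pos (by norm_num : (0:Int) ≤ 255)]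
      rw [show Int.toNat 255 = 255 from rfl, ← hk]
    · have hx : PySem.Int.bxor (n : Int) b = -((n ^^^ k : Nat) : Int) - 1 := by
        simp only [PySem.Int.bxor, if_pos (Int.natCast_nonneg n), if_neg (by omega : ¬ (0:Int) ≤ b)]
        simp only [Int.toNat_natCast]
        rw [← hk]
      rw [hx]
      have hneg : ¬ (0:Int) ≤ -((n ^^^ k : Nat) : Int) - 1 := by
        have := Int.natCast_nonneg (n ^^^ k); omega
      simp only [PySem.Int.band, if_neg hneg, if_pos (by norm_num : (0:Int) ≤ 255)]
      rw [show Int.toNat 255 = 255 from rfl,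
        show (-(-((n ^^^ k : Nat) : Int) - 1) - 1).toNat = n ^^^ k by simp]
      rw [pvSub255 (255 &&& (n ^^^ k)) (by have := @Nat.and_le_left 255 (n ^^^ k); omega)]
      rw [pvSub255 (255 &&& k) (by have := @Nat.and_le_left 255 k; omega)]
      exact congrArg (Nat.cast : Nat → Int) (pvL8 n k).symm

theorem pvFoldl_append {α β : Type} (F : α → β) (l : List α) (acc : List β) :
    l.foldl (fun tbl i => tbl ++ [F i]) acc = acc ++ l.map F := by
  induction l generalizing acc with
  | nil => simp
  | cons a l ih => simp [List.foldl_cons, ih]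

-- the table is the map of the 8-fold iteration over range(256)
set_option maxRecDepth 8192 in
theorem pvTable_eq :
    ((PySem.List.pyRange 0 256 1).foldl (fun tbl i =>
      tbl ++ [(PySem.List.pyRange 0 8 1).foldl (fun fp _ =>
        PySem.Int.bxor (fp >>> (1:Nat)) (PySem.Int.band 0xC15D213AA4D7A795 (-(PySem.Int.band fp 1)))) i]) []) =
    (List.range 256).map (fun j => ((pvStepN^[8] j : Nat) : Int)) := by
  rw [pvFoldl_append _ _ []]
  rw [List.nil_append]
  have hpr : PySem.List.pyRange 0 256 1 = (List.range 256).map (Nat.cast : Nat → Int) := by decide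
  rw [hpr, List.map_map]
  apply List.map_congr_left
  intro j _
  have hfun : (fun (fp : Int) (_ : Int) =>
      PySem.Int.bxor (fp >>> (1:Nat)) (PySem.Int.band 0xC15D213AA4D7A795 (-(PySem.Int.band fp 1)))) =
      (fun fp _ => pvStepI fp) := rfl
  simp only [Function.comp_apply]
  rw [hfun, pvFoldl_const, show (PySem.List.pyRange 0 8 1).length = 8 from rfl, pvStepI_iter_cast]

theorem pvStep_eq (n : Nat) (b : Int) :
    PySem.Int.bxor ((n : Int) >>> (8:Nat))
      ((PySem.List.pyGet? ((List.range 256).map (fun j => ((pvStepN^[8] j : Nat) : Int)))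
        (PySem.Int.band (PySem.Int.bxor (n : Int) b) 255)).getD 0) =
    ((pvStepN^[8] (n ^^^ (PySem.Int.band b 255).toNat) : Nat) : Int) := by
  obtain ⟨m, hm, hb255, hidx⟩ := pvByteIdx n b
  rw [hidx, PySem.List.pyGet?_natCast, List.getElem?_map, List.getElem?_range (pvAnd255_lt _)]
  simp only [Option.map_some, Option.getD_some]
  rw [show ((n:Int) >>> (8:Nat)) = ((n >>> 8 : Nat) : Int) from rfl, PySem.Int.bxor_natCast]
  rw [hb255, Int.toNat_natCast]
  congr 1
  rw [pvKey8 (n ^^^ m), pvXor_small_shift n hm]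

theorem pvFold_eq (data : List Int) (n : Nat) :
    data.foldl (fun result byte =>
      PySem.Int.bxor (result >>> (8:Nat))
        ((PySem.List.pyGet? ((List.range 256).map (fun j => ((pvStepN^[8] j : Nat) : Int)))
          (PySem.Int.band (PySem.Int.bxor result byte) 255)).getD 0)) (n : Int) =
    data.foldl (fun result byte =>
      (PySem.List.pyRange 0 8 1).foldl (fun r _ =>
        PySem.Int.bxor (r >>> (1:Nat)) (PySem.Int.band 0xC15D213AA4D7A795 (-(PySem.Int.band r 1))))
        (PySem.Int.bxor result (PySem.Int.band byte 255))) (n : Int) := by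
  induction data generalizing n with
  | nil => rfl
  | cons b data ih =>
    rw [List.foldl_cons, List.foldl_cons]
    obtain ⟨m, hm, hb255, hidx⟩ := pvByteIdx n b
    have hB : (PySem.List.pyRange 0 8 1).foldl (fun r _ =>
        PySem.Int.bxor (r >>> (1:Nat)) (PySem.Int.band 0xC15D213AA4D7A795 (-(PySem.Int.band r 1))))
        (PySem.Int.bxor (n : Int) (PySem.Int.band b 255)) =
        ((pvStepN^[8] (n ^^^ m) : Nat) : Int) := by
      rw [hb255, PySem.Int.bxor_natCast]
      have hfun : (fun (r : Int) (_ : Int) =>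
          PySem.Int.bxor (r >>> (1:Nat)) (PySem.Int.band 0xC15D213AA4D7A795 (-(PySem.Int.band r 1)))) =
          (fun r _ => pvStepI r) := rfl
      rw [hfun, pvFoldl_const, show (PySem.List.pyRange 0 8 1).length = 8 from rfl,
        pvStepI_iter_cast]
    have hA := pvStep_eq n b
    rw [hb255, Int.toNat_natCast] at hA
    rw [hA, hB]
    exact ih _

-- ===== VERDICT (by name: the statement is the Claim_ definition above) =====
theorem rabin_fingerprint_spec : Claim_equal_rabin_fingerprint := by
  intro data _
  unfold Spec_rabin_fingerprint rabin_fingerprint rabin_fingerprint_alt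
  simp only
  rw [pvTable_eq]
  congr 1
  exact pvFold_eq data 0xC15D213AA4D7A795
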